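-- pv_equiv track=rewrite | github.com/JPZEBRA/python_study_case | png-converter.py | conv16to64
-- ===== SOURCE A (Python) =====
-- def rdd(data,x,y,w,h) :
--
--         if x < 0 :
--                 return 0
--         if y < 0 :
--                 return 0
--         if x >= w :
--                 return 0
--         if y >= h :
--                 return 0
--
--         return data[y][x]
--
-- def conv16to64(data,w,h) :
--
--         buffer = []
--
--         for y in range(0,h) :
--
--                 for x in range(0,w) :
--
--                         red = rdd(data,(x>>1)*2 + 0,(y>>1)*2 + 0,w,h)
--                         gr1 = rdd(data,(x>>1)*2 + 1,(y>>1)*2 + 0,w,h)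
--                         gr2 = rdd(data,(x>>1)*2 + 0,(y>>1)*2 + 1,w,h)
--                         blu = rdd(data,(x>>1)*2 + 1,(y>>1)*2 + 1,w,h)
--
--                         grn = (( 0xFFFF & gr1 ) + gr2) // 2
--                         alp = 0xFF
--
--                         buffer.append(alp)
--                         buffer.append(red)
--                         buffer.append(grn)
--                         buffer.append(blu)
--
--         return buffer
-- ===== SOURCE B (Python) =====
-- def conv16to64(data, w, h):
--     # Build the reduced 2x2-block table once, then expand it per pixel.
--     def sample(x, y):
--         if 0 <= x < w and 0 <= y < h:
--             return data[y][x]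
--         return 0
--
--     grid = []
--     for by in range((h + 1) // 2):
--         row = []
--         for bx in range((w + 1) // 2):
--             red = sample(2 * bx, 2 * by)
--             gr1 = sample(2 * bx + 1, 2 * by)
--             gr2 = sample(2 * bx, 2 * by + 1)
--             blu = sample(2 * bx + 1, 2 * by + 1)
--             row.append((red, ((0xFFFF & gr1) + gr2) // 2, blu))
--         grid.append(row)
--
--     out = []
--     for y in range(h):
--         for x in range(w):
--             red, grn, blu = grid[y // 2][x // 2]
--             out.append(0xFF)
--             out.append(red)
--             out.append(grn)
--             out.append(blu)
--     return out
-- ===== Notes on version B (the rewrite author's own statement) =====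
-- stated objective: alternative
-- what changed: B first builds a reduced 2x2-block table of (red,grn,blu) triples (one demosaic computation per block instead of per pixel), then a second pass expands the table into the RGBA buffer; A recomputes all four samples inside every pixel of one nested loop.
import Mathlib
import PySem

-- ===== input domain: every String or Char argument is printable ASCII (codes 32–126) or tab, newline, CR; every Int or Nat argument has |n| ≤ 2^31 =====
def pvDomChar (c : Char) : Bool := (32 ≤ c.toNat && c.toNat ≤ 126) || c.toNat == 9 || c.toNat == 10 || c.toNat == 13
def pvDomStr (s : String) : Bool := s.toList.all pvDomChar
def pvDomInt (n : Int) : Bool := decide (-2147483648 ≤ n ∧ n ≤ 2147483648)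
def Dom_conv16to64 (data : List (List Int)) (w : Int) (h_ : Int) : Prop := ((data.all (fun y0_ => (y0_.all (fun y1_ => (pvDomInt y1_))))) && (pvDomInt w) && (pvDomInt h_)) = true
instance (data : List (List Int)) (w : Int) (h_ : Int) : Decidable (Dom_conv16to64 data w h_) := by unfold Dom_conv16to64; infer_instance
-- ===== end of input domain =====

-- B builds the 2x2-block table once and then expands it; same result as A's per-pixel recomputation (alternative decomposition, same cost).

-- ===== PORT A =====
def rdd (data : List (List Int)) (x y w h : Int) : Int :=
  if x < 0 then 0
  else if y < 0 then 0
  else if x ≥ w then 0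
  else if y ≥ h then 0
  else PySem.List.pyGetD (PySem.List.pyGetD data y []) x 0

def conv16to64 (data : List (List Int)) (w : Int) (h_ : Int) : List Int :=
  (PySem.List.pyRange 0 h_ 1).foldl (fun buffer (y : Int) =>
    (PySem.List.pyRange 0 w 1).foldl (fun buffer (x : Int) =>
      let red := rdd data ((x >>> (1:Nat)) * 2 + 0) ((y >>> (1:Nat)) * 2 + 0) w h_
      let gr1 := rdd data ((x >>> (1:Nat)) * 2 + 1) ((y >>> (1:Nat)) * 2 + 0) w h_
      let gr2 := rdd data ((x >>> (1:Nat)) * 2 + 0) ((y >>> (1:Nat)) * 2 + 1) w h_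
      let blu := rdd data ((x >>> (1:Nat)) * 2 + 1) ((y >>> (1:Nat)) * 2 + 1) w h_
      let grn := PySem.Int.floordiv (PySem.Int.band 0xFFFF gr1 + gr2) 2
      let alp : Int := 0xFF
      buffer ++ [alp] ++ [red] ++ [grn] ++ [blu]) buffer) []

-- ===== PORT B =====
def pvSample (data : List (List Int)) (w h x y : Int) : Int :=
  if 0 ≤ x ∧ x < w ∧ 0 ≤ y ∧ y < h then PySem.List.pyGetD (PySem.List.pyGetD data y []) x 0 else (0 : Int)

def pvBlock (data : List (List Int)) (w h bx by_ : Int) : Int × Int × Int :=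
  let red := pvSample data w h (2 * bx) (2 * by_)
  let gr1 := pvSample data w h (2 * bx + 1) (2 * by_)
  let gr2 := pvSample data w h (2 * bx) (2 * by_ + 1)
  let blu := pvSample data w h (2 * bx + 1) (2 * by_ + 1)
  (red, PySem.Int.floordiv (PySem.Int.band 0xFFFF gr1 + gr2) 2, blu)

def conv16to64_alt (data : List (List Int)) (w : Int) (h_ : Int) : List Int :=
  let grid : List (List (Int × Int × Int)) :=
    (PySem.List.pyRange 0 (PySem.Int.floordiv (h_ + 1) 2) 1).foldl (fun g by_ =>
      g ++ [(PySem.List.pyRange 0 (PySem.Int.floordiv (w + 1) 2) 1).foldl (fun row bx =>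
        row ++ [pvBlock data w h_ bx by_]) []]) []
  (PySem.List.pyRange 0 h_ 1).foldl (fun out y =>
    (PySem.List.pyRange 0 w 1).foldl (fun out x =>
      let t := PySem.List.pyGetD (PySem.List.pyGetD grid (PySem.Int.floordiv y 2) []) (PySem.Int.floordiv x 2) (0, 0, 0)
      out ++ [(0xFF : Int), t.1, t.2.1, t.2.2]) out) []

-- ===== PRECONDITION & SPEC =====
-- Pre_ excludes exactly the inputs where A raises IndexError: a requested grid (w > 0, h_ > 0)
-- whose first h_ rows are missing or shorter than w.
def Pre_conv16to64 (data : List (List Int)) (w : Int) (h_ : Int) : Prop :=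
  w ≤ 0 ∨ h_ ≤ 0 ∨ (h_ ≤ data.length ∧ ∀ row ∈ data.take h_.toNat, w ≤ row.length)
instance (data : List (List Int)) (w : Int) (h_ : Int) : Decidable (Pre_conv16to64 data w h_) := by unfold Pre_conv16to64; infer_instance

def pvWitness_conv16to64 : List (List Int) × Int × Int := ([[1, 2], [3, 4]], 2, 2)

def Spec_conv16to64 (data : List (List Int)) (w : Int) (h_ : Int) (out : List Int) : Prop := out = conv16to64_alt data w h_
instance (data : List (List Int)) (w : Int) (h_ : Int) (out : List Int) : Decidable (Spec_conv16to64 data w h_ out) := by unfold Spec_conv16to64; infer_instance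

-- ===== CLAIM (what is proved, stated in full; the proofs are below) =====
def Claim_equal_conv16to64 : Prop := ∀ (data : List (List Int)) (w : Int) (h_ : Int), Dom_conv16to64 data w h_ → Pre_conv16to64 data w h_ → Spec_conv16to64 data w h_ (conv16to64 data w h_)

-- ===== LEMMAS AND PROOFS =====

-- per-pixel values the two ports compute (proof-only helpers)
def pixA (data : List (List Int)) (w h_ x y : Int) : List Int :=
  [0xFF,
   rdd data ((x >>> (1:Nat)) * 2 + 0) ((y >>> (1:Nat)) * 2 + 0) w h_,
   PySem.Int.floordiv (PySem.Int.band 0xFFFF (rdd data ((x >>> (1:Nat)) * 2 + 1) ((y >>> (1:Nat)) * 2 + 0) w h_)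
     + rdd data ((x >>> (1:Nat)) * 2 + 0) ((y >>> (1:Nat)) * 2 + 1) w h_) 2,
   rdd data ((x >>> (1:Nat)) * 2 + 1) ((y >>> (1:Nat)) * 2 + 1) w h_]

def pvGrid (data : List (List Int)) (w h_ : Int) : List (List (Int × Int × Int)) :=
  (PySem.List.pyRange 0 (PySem.Int.floordiv (h_ + 1) 2) 1).map (fun by_ =>
    (PySem.List.pyRange 0 (PySem.Int.floordiv (w + 1) 2) 1).map (fun bx =>
      pvBlock data w h_ bx by_))

def pixB (data : List (List Int)) (w h_ x y : Int) : List Int :=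
  let t := PySem.List.pyGetD (PySem.List.pyGetD (pvGrid data w h_)
    (PySem.Int.floordiv y 2) []) (PySem.Int.floordiv x 2) (0, 0, 0)
  [(0xFF : Int), t.1, t.2.1, t.2.2]

theorem rdd_eq_sample (data : List (List Int)) (w h x y : Int) :
    rdd data x y w h = pvSample data w h x y := by
  unfold rdd pvSample
  split_ifs <;> first | rfl | omega

theorem shiftRight_one_eq_floordiv (x : Int) (h : 0 ≤ x) :
    (x >>> (1:Nat)) = PySem.Int.floordiv x 2 := by
  obtain ⟨n, rfl⟩ := Int.eq_ofNat_of_zero_le h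
  simp [Int.shiftRight_eq_div_pow]

theorem convA_flat (data : List (List Int)) (w h_ : Int) :
    conv16to64 data w h_ =
      (PySem.List.pyRange 0 h_ 1).flatMap (fun y =>
        (PySem.List.pyRange 0 w 1).flatMap (fun x => pixA data w h_ x y)) := by
  unfold conv16to64
  have h1 : ∀ (buf : List Int) (y : Int),
      (PySem.List.pyRange 0 w 1).foldl (fun (buffer : List Int) (x : Int) =>
        let red := rdd data ((x >>> (1:Nat)) * 2 + 0) ((y >>> (1:Nat)) * 2 + 0) w h_
        let gr1 := rdd data ((x >>> (1:Nat)) * 2 + 1) ((y >>> (1:Nat)) * 2 + 0) w h_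
        let gr2 := rdd data ((x >>> (1:Nat)) * 2 + 0) ((y >>> (1:Nat)) * 2 + 1) w h_
        let blu := rdd data ((x >>> (1:Nat)) * 2 + 1) ((y >>> (1:Nat)) * 2 + 1) w h_
        let grn := PySem.Int.floordiv (PySem.Int.band 0xFFFF gr1 + gr2) 2
        let alp : Int := 0xFF
        buffer ++ [alp] ++ [red] ++ [grn] ++ [blu]) buf
      = buf ++ (PySem.List.pyRange 0 w 1).flatMap (fun x => pixA data w h_ x y) := by
    intro buf y
    have hf : (fun (buffer : List Int) (x : Int) =>
        let red := rdd data ((x >>> (1:Nat)) * 2 + 0) ((y >>> (1:Nat)) * 2 + 0) w h_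
        let gr1 := rdd data ((x >>> (1:Nat)) * 2 + 1) ((y >>> (1:Nat)) * 2 + 0) w h_
        let gr2 := rdd data ((x >>> (1:Nat)) * 2 + 0) ((y >>> (1:Nat)) * 2 + 1) w h_
        let blu := rdd data ((x >>> (1:Nat)) * 2 + 1) ((y >>> (1:Nat)) * 2 + 1) w h_
        let grn := PySem.Int.floordiv (PySem.Int.band 0xFFFF gr1 + gr2) 2
        let alp : Int := 0xFF
        buffer ++ [alp] ++ [red] ++ [grn] ++ [blu])
        = (fun (buffer : List Int) (x : Int) => buffer ++ pixA data w h_ x y) := by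
      funext buffer x
      simp [pixA]
    rw [hf, PySem.List.foldl_append_eq_flatMap]
  simp only [h1]
  rw [PySem.List.foldl_append_eq_flatMap]
  simp

theorem convB_flat (data : List (List Int)) (w h_ : Int) :
    conv16to64_alt data w h_ =
      (PySem.List.pyRange 0 h_ 1).flatMap (fun y =>
        (PySem.List.pyRange 0 w 1).flatMap (fun x => pixB data w h_ x y)) := by
  unfold conv16to64_alt
  have hg : (PySem.List.pyRange 0 (PySem.Int.floordiv (h_ + 1) 2) 1).foldl (fun g by_ =>
      g ++ [(PySem.List.pyRange 0 (PySem.Int.floordiv (w + 1) 2) 1).foldl (fun row bx =>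
        row ++ [pvBlock data w h_ bx by_]) []]) []
      = pvGrid data w h_ := by
    simp only [PySem.List.foldl_append_singleton_eq_map, List.nil_append, pvGrid]
  rw [hg]
  have h1 : ∀ (buf : List Int) (y : Int),
      (PySem.List.pyRange 0 w 1).foldl (fun (out : List Int) (x : Int) =>
        let t := PySem.List.pyGetD (PySem.List.pyGetD (pvGrid data w h_)
          (PySem.Int.floordiv y 2) []) (PySem.Int.floordiv x 2) (0, 0, 0)
        out ++ [(0xFF : Int), t.1, t.2.1, t.2.2]) buf
      = buf ++ (PySem.List.pyRange 0 w 1).flatMap (fun x => pixB data w h_ x y) := by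
    intro buf y
    have hf : (fun (out : List Int) (x : Int) =>
        let t := PySem.List.pyGetD (PySem.List.pyGetD (pvGrid data w h_)
          (PySem.Int.floordiv y 2) []) (PySem.Int.floordiv x 2) (0, 0, 0)
        out ++ [(0xFF : Int), t.1, t.2.1, t.2.2])
        = (fun (out : List Int) (x : Int) => out ++ pixB data w h_ x y) := by
      funext out x
      simp [pixB]
    rw [hf, PySem.List.foldl_append_eq_flatMap]
  simp only [h1]
  rw [PySem.List.foldl_append_eq_flatMap]
  simp

theorem pix_eq (data : List (List Int)) (w h_ x y : Int)
    (hx : 0 ≤ x ∧ x < w) (hy : 0 ≤ y ∧ y < h_) :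
    pixA data w h_ x y = pixB data w h_ x y := by
  have hy2 : 0 ≤ PySem.Int.floordiv y 2 ∧ PySem.Int.floordiv y 2 < PySem.Int.floordiv (h_ + 1) 2 := by
    rw [PySem.Int.floordiv_eq_ediv_of_pos (by omega), PySem.Int.floordiv_eq_ediv_of_pos (by omega)]
    omega
  have hx2 : 0 ≤ PySem.Int.floordiv x 2 ∧ PySem.Int.floordiv x 2 < PySem.Int.floordiv (w + 1) 2 := by
    rw [PySem.Int.floordiv_eq_ediv_of_pos (by omega), PySem.Int.floordiv_eq_ediv_of_pos (by omega)]
    omega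
  unfold pixB pvGrid
  rw [PySem.List.pyGetD_map_pyRange_of_nonneg _ _ _ _ hy2.1 hy2.2,
      PySem.List.pyGetD_map_pyRange_of_nonneg _ _ _ _ hx2.1 hx2.2]
  simp only [pixA, pvBlock,
    shiftRight_one_eq_floordiv x hx.1, shiftRight_one_eq_floordiv y hy.1,
    rdd_eq_sample, add_zero, mul_comm]

-- ===== VERDICT (by name: the statement is the Claim_ definition above) =====
theorem conv16to64_spec : Claim_equal_conv16to64 := by
  intro data w h_ _hd _hp
  unfold Spec_conv16to64
  rw [convA_flat, convB_flat]
  refine List.flatMap_congr (fun y hy => ?_)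
  rw [PySem.List.mem_pyRange_one] at hy
  refine List.flatMap_congr (fun x hx => ?_)
  rw [PySem.List.mem_pyRange_one] at hx
  exact pix_eq data w h_ x y hx hy
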